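-- pv_equiv track=rewrite | github.com/dywisor/roverlay | scripts/find_invalid.py | ebuild_check
-- ===== SOURCE A (Python) =====
-- def ebuild_check ( filenames ):
-- 	man = False
-- 	mtd = False
-- 	eb  = False
-- 	for f in filenames:
-- 		if f.endswith ( '.ebuild' ):
-- 			eb = True
--
-- 		elif f == 'metadata.xml':
-- 			mtd = True
--
-- 		elif f == 'Manifest':
-- 			man = True
--
-- 		if eb and mtd and man:
-- 			return ( True, True, True )
--
-- 	return ( eb, mtd, man )
-- ===== SOURCE B (Python) =====
-- def ebuild_check(filenames):
--     files = list(filenames)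
--     eb = any(f.endswith('.ebuild') for f in files)
--     mtd = 'metadata.xml' in files
--     man = 'Manifest' in files
--     return (eb, mtd, man)
-- ===== Notes on version B (the rewrite author's own statement) =====
-- stated objective: idiomatic
-- what changed: Replaces the single flag-accumulating loop with early exit by three independent any/membership scans over the materialized list.
import Mathlib
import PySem

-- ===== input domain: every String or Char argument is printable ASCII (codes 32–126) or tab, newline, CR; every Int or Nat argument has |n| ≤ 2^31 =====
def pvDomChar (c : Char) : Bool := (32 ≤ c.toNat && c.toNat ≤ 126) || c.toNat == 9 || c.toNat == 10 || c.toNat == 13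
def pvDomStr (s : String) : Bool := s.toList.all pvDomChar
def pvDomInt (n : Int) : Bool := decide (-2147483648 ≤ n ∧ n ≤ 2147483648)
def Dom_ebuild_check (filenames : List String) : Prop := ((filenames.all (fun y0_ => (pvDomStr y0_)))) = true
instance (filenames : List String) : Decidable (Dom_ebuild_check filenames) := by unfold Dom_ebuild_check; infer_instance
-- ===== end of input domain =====

-- B replaces A's single flag-accumulating loop with early exit by three independent scans (idiomatic decomposition, same cost).

-- ===== PORT A =====
-- the for-loop of A, carrying the three flags, with the early return inside the loop
def ebuildCheckGo : List String → Bool → Bool → Bool → Bool × Bool × Bool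
  | [], eb, mtd, man => (eb, mtd, man)
  | f :: rest, eb, mtd, man =>
    let st :=
      if PySem.Str.endswith f ".ebuild" then (true, mtd, man)
      else if f == "metadata.xml" then (eb, true, man)
      else if f == "Manifest" then (eb, mtd, true)
      else (eb, mtd, man)
    if st.1 && st.2.1 && st.2.2 then (true, true, true)
    else ebuildCheckGo rest st.1 st.2.1 st.2.2

def ebuild_check (filenames : List String) : Bool × Bool × Bool :=
  ebuildCheckGo filenames false false false

-- ===== PORT B =====
def ebuild_check_alt (filenames : List String) : Bool × Bool × Bool :=
  let files := filenames
  let eb := files.any (fun f => PySem.Str.endswith f ".ebuild")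
  let mtd := files.contains "metadata.xml"
  let man := files.contains "Manifest"
  (eb, mtd, man)

-- ===== PRECONDITION & SPEC =====
def Spec_ebuild_check (filenames : List String) (out : Bool × Bool × Bool) : Prop := out = ebuild_check_alt filenames
instance (filenames : List String) (out : Bool × Bool × Bool) : Decidable (Spec_ebuild_check filenames out) := by unfold Spec_ebuild_check; infer_instance

-- ===== CLAIM (what is proved, stated in full; the proofs are below) =====
def Claim_equal_ebuild_check : Prop := ∀ (filenames : List String), Dom_ebuild_check filenames → Spec_ebuild_check filenames (ebuild_check filenames)

-- ===== LEMMAS AND PROOFS =====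

theorem go_eq (fs : List String) : ∀ eb mtd man,
    ebuildCheckGo fs eb mtd man =
      (eb || fs.any (fun f => PySem.Str.endswith f ".ebuild"),
       mtd || fs.contains "metadata.xml",
       man || fs.contains "Manifest") := by
  induction fs with
  | nil => intro eb mtd man; simp [ebuildCheckGo]
  | cons f rest ih =>
    intro eb mtd man
    simp only [ebuildCheckGo, List.any_cons, List.contains_cons]
    by_cases he : PySem.Str.endswith f ".ebuild" = true
    · have hm : f ≠ "metadata.xml" := by
        intro h; subst h; exact absurd he (by decide)
      have hn : f ≠ "Manifest" := by
        intro h; subst h; exact absurd he (by decide)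
      simp only [he, if_true, beq_iff_eq, hm, hn, if_false]
      cases mtd <;> cases man <;> simp [ih, Ne.symm hm, Ne.symm hn]
    · simp only [eq_false_of_ne_true he, Bool.false_or]
      by_cases hm : f = "metadata.xml"
      · subst hm
        simp only [beq_self_eq_true, if_true]
        cases eb <;> cases man <;> simp [ih]
      · simp only [beq_iff_eq, hm, if_false]
        by_cases hn : f = "Manifest"
        · subst hn
          simp only [if_true]
          cases eb <;> cases mtd <;> simp [ih]
        · simp only [hn, if_false]
          cases eb <;> cases mtd <;> cases man <;>
            simp [ih, Ne.symm hm, Ne.symm hn]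

-- ===== VERDICT (by name: the statement is the Claim_ definition above) =====
theorem ebuild_check_spec : Claim_equal_ebuild_check := by
  intro fs _
  unfold Spec_ebuild_check ebuild_check ebuild_check_alt
  simp [go_eq]
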